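-- pv_equiv track=rewrite | github.com/Kekoa2018/pypdfium2 | src/pypdfium2/_helpers/utilities.py | colour_as_hex
-- ===== SOURCE A (Python) =====
-- def _hex_digits(c):
--
--     hxc = hex(c)[2:]
--
--     if len(hxc) == 1:
--         hxc = "0" + hxc
--
--     return hxc
--
-- def colour_as_hex(r, g, b, a=255) -> int:
--     """
--     Convert a colour given as integers of ``red, green, blue, alpha`` ranging from 0 to 255
--     to a single value in 8888 ARGB format.
--     """
--
--     colours = (a, r, g, b)
--
--     for c in colours:
--         assert isinstance(c, int)
--         assert 0 <= c <= 255
--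
--     hxc_str = "0x"
--     for c in colours:
--         hxc_str += _hex_digits(c)
--
--     hxc_int = int(hxc_str, 0)
--
--     return hxc_int
-- ===== SOURCE B (Python) =====
-- def colour_as_hex(r, g, b, a=255) -> int:
--     """
--     Convert a colour given as integers of ``red, green, blue, alpha`` ranging from 0 to 255
--     to a single value in 8888 ARGB format.
--     """
--     for c in (a, r, g, b):
--         assert isinstance(c, int)
--         assert 0 <= c <= 255
--     return a * 0x1000000 + r * 0x10000 + g * 0x100 + b
-- ===== Notes on version B (the rewrite author's own statement) =====
-- stated objective: simpler
-- what changed: B replaces A's build-a-hex-string-per-channel-and-reparse pass (hex(), zero-padding, string concatenation, int(s,0)) with a single closed-form arithmetic expression a*0x1000000 + r*0x10000 + g*0x100 + b, keeping the same four a,r,g,b range asserts.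
import Mathlib
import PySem

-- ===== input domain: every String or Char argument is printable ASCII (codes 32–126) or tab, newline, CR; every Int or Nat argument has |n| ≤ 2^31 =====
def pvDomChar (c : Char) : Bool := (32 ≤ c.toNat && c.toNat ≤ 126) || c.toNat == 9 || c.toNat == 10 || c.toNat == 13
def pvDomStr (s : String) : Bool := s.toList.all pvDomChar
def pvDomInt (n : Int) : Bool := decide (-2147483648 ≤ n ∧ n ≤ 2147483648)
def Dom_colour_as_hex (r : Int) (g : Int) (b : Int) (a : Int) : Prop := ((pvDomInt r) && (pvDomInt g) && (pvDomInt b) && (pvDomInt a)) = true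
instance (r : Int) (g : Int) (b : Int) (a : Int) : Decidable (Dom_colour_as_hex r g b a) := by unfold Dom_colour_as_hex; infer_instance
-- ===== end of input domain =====

-- B replaces A's per-channel hex-string building and reparsing with one closed-form
-- arithmetic expression; equivalence proved on the inputs where A's asserts pass.

-- ===== PORT A =====
-- lowercase hex digit character, as produced by Python's hex()
def pvHexChar (n : Nat) : Char :=
  (['0','1','2','3','4','5','6','7','8','9','a','b','c','d','e','f']).getD n '0'

-- hex(c)[2:] for a nonnegative int: most-significant-first lowercase hex digits
-- (structural fuel = n+1, always enough digits; keeps the definition kernel-reducible)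
def pvHexRepAux : Nat → Nat → List Char
  | 0, _ => []
  | fuel + 1, n =>
    if n < 16 then [pvHexChar n]
    else pvHexRepAux fuel (n / 16) ++ [pvHexChar (n % 16)]

def pvHexRep (n : Nat) : List Char := pvHexRepAux (n + 1) n

-- _hex_digits: pad to two characters when one
def pvHexDigits (c : Nat) : List Char :=
  let hxc := pvHexRep c
  if hxc.length = 1 then '0' :: hxc else hxc

-- value of a lowercase hex digit character (exact on the digits pvHexChar produces)
def pvHexVal (c : Char) : Nat := if c ≤ '9' then c.toNat - 48 else c.toNat - 87

-- int(s, 0) for a "0x…" string: strip the prefix, accumulate base 16 (exact there)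
def pvParseHex0x (s : List Char) : Nat :=
  match s with
  | '0' :: 'x' :: rest => rest.foldl (fun acc c => acc * 16 + pvHexVal c) 0
  | _ => 0

def colour_as_hex (r : Int) (g : Int) (b : Int) (a : Int) : Int :=
  let colours := [a, r, g, b]
  -- the asserts raise outside Pre_colour_as_hex; nothing is claimed there
  let hxc_str := colours.foldl (fun s c => s ++ pvHexDigits c.toNat) ['0','x']
  (pvParseHex0x hxc_str : Int)

-- ===== PORT B =====
def colour_as_hex_alt (r : Int) (g : Int) (b : Int) (a : Int) : Int :=
  a * 0x1000000 + r * 0x10000 + g * 0x100 + b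

-- ===== PRECONDITION & SPEC =====
-- exactly the inputs on which A's asserts pass (otherwise A raises AssertionError)
def Pre_colour_as_hex (r : Int) (g : Int) (b : Int) (a : Int) : Prop :=
  0 ≤ r ∧ r ≤ 255 ∧ 0 ≤ g ∧ g ≤ 255 ∧ 0 ≤ b ∧ b ≤ 255 ∧ 0 ≤ a ∧ a ≤ 255
instance (r : Int) (g : Int) (b : Int) (a : Int) : Decidable (Pre_colour_as_hex r g b a) := by unfold Pre_colour_as_hex; infer_instance

def pvWitness_colour_as_hex : Int × Int × Int × Int := (10, 20, 30, 255)

def Spec_colour_as_hex (r : Int) (g : Int) (b : Int) (a : Int) (out : Int) : Prop := out = colour_as_hex_alt r g b a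
instance (r : Int) (g : Int) (b : Int) (a : Int) (out : Int) : Decidable (Spec_colour_as_hex r g b a out) := by unfold Spec_colour_as_hex; infer_instance

-- ===== CLAIM (what is proved, stated in full; the proofs are below) =====
def Claim_equal_colour_as_hex : Prop := ∀ (r : Int) (g : Int) (b : Int) (a : Int), Dom_colour_as_hex r g b a → Pre_colour_as_hex r g b a → Spec_colour_as_hex r g b a (colour_as_hex r g b a)

-- ===== LEMMAS AND PROOFS =====

-- the fold step is affine in the accumulator
theorem pv_foldl_affine (l : List Char) (acc : Nat) :
    l.foldl (fun x c => x * 16 + pvHexVal c) acc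
      = acc * 16 ^ l.length + l.foldl (fun x c => x * 16 + pvHexVal c) 0 := by
  induction l generalizing acc with
  | nil => simp
  | cons c t ih =>
    simp only [List.foldl_cons, List.length_cons]
    rw [ih (acc * 16 + pvHexVal c), ih (0 * 16 + pvHexVal c)]
    ring

-- each byte's two hex digits parse back to the byte (finite check)
set_option maxRecDepth 4000 in
theorem pv_byte_check : ∀ n : Fin 256,
    (pvHexDigits n.val).foldl (fun x c => x * 16 + pvHexVal c) 0 = n.val ∧
    (pvHexDigits n.val).length = 2 := by decide

theorem pv_byte_fold (n : Nat) (h : n < 256) (acc : Nat) :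
    (pvHexDigits n).foldl (fun x c => x * 16 + pvHexVal c) acc = acc * 256 + n := by
  have hb := pv_byte_check ⟨n, h⟩
  rw [pv_foldl_affine, hb.2, hb.1]
  norm_num

-- ===== VERDICT (by name: the statement is the Claim_ definition above) =====
theorem colour_as_hex_spec : Claim_equal_colour_as_hex := by
  intro r g b a _ hpre
  obtain ⟨hr0, hr1, hg0, hg1, hb0, hb1, ha0, ha1⟩ := hpre
  unfold Spec_colour_as_hex colour_as_hex colour_as_hex_alt
  simp only [List.foldl_cons, List.foldl_nil, List.append_assoc]
  have hstep : ∀ (rest : List Char),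
      pvParseHex0x ('0' :: 'x' :: rest) = rest.foldl (fun acc c => acc * 16 + pvHexVal c) 0 := by
    intro rest; rfl
  show ((pvParseHex0x (['0','x'] ++ (pvHexDigits a.toNat ++ (pvHexDigits r.toNat ++ (pvHexDigits g.toNat ++ pvHexDigits b.toNat)))) : Nat) : Int) = _
  rw [show (['0','x'] ++ (pvHexDigits a.toNat ++ (pvHexDigits r.toNat ++ (pvHexDigits g.toNat ++ pvHexDigits b.toNat))))
        = '0' :: 'x' :: (pvHexDigits a.toNat ++ (pvHexDigits r.toNat ++ (pvHexDigits g.toNat ++ pvHexDigits b.toNat))) from rfl,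
      hstep]
  rw [List.foldl_append, List.foldl_append, List.foldl_append]
  rw [pv_byte_fold a.toNat (by omega) 0,
      pv_byte_fold r.toNat (by omega),
      pv_byte_fold g.toNat (by omega),
      pv_byte_fold b.toNat (by omega)]
  have := Int.toNat_of_nonneg hr0
  have := Int.toNat_of_nonneg hg0
  have := Int.toNat_of_nonneg hb0
  have := Int.toNat_of_nonneg ha0
  push_cast
  omega
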